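-- pv_equiv track=rewrite | github.com/prakruthishekar/Competitive-Coding | OA/gagana oa/3.py | solution
-- ===== SOURCE A (Python) =====
-- def solution(times):
--     ID_CHECK_DURATION = 5 * 60  # 5 minutes converted to seconds
--     MAX_QUEUE_LENGTH = 10
--     queue = []  # Queue to keep track of the finish times of people in the queue
--
--     # Start processing from time of arrival of the first person
--     current_time = times[0]
--     for arrival_time in times:
--         # Remove people from the queue who have finished their ID check
--         while queue and queue[0] <= arrival_time:
--             queue.pop(0)
--
--         # Check if the queue is not full
--         if len(queue) < MAX_QUEUE_LENGTH:
--             if not queue: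
--                 # If queue is empty, start ID check immediately
--                 finish_time = arrival_time + ID_CHECK_DURATION
--             else:
--                 # Start ID check when the last person in the queue is done
--                 finish_time = max(queue[-1], arrival_time) + ID_CHECK_DURATION
--
--             queue.append(finish_time)  # Add the finish time to the queue
--             current_time = finish_time  # Update the current time
--         else:
--             # If the queue is full, the person leaves and we do nothing
--             pass
--
--     # The last finish time in the queue is when the last person is processed
--     last_finish_time = queue[-1] if queue else current_time
--
--     return last_finish_time
-- ===== SOURCE B (Python) =====
-- def _bisect_right(a, x, lo, hi):
--     # binary search: first index in [lo, hi) whose value is > x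
--     while lo < hi:
--         mid = (lo + hi) // 2
--         if a[mid] <= x:
--             lo = mid + 1
--         else:
--             hi = mid
--     return lo
--
-- def solution(times):
--     ID_CHECK_DURATION = 5 * 60
--     MAX_QUEUE_LENGTH = 10
--     finishes = []   # every finish time ever assigned, ascending
--     start = 0       # index of the first still-active entry
--     current_time = times[0]
--     for arrival in times:
--         # drop all finished people at once with a binary search
--         start = _bisect_right(finishes, arrival, start, len(finishes))
--         active = len(finishes) - start
--         if active < MAX_QUEUE_LENGTH:
--             if active == 0:
--                 finish = arrival + ID_CHECK_DURATION
--             else: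
--                 finish = finishes[-1] + ID_CHECK_DURATION
--             finishes.append(finish)
--     return finishes[-1] if finishes else current_time
-- ===== Notes on version B (the rewrite author's own statement) =====
-- stated objective: alternative
-- what changed: Replaces A's mutable queue with repeated pop(0) shifts by an append-only sorted list of finish times plus a start pointer advanced by binary search, exploiting that finish times are monotone; the queue is the slice finishes[start:], never materialised.
import Mathlib
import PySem

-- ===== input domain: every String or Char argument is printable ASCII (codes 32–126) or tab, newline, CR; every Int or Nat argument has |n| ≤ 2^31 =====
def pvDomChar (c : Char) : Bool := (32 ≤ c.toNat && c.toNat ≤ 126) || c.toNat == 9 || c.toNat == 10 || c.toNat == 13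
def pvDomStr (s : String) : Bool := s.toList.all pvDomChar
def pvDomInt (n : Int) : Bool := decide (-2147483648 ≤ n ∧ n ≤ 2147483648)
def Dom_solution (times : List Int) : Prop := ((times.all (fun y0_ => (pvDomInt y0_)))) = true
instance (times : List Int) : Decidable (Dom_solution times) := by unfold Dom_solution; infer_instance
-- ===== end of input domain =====

-- B replaces A's per-arrival pop(0) loop on a mutable queue by a never-shrinking sorted list of
-- finish times plus a pointer advanced by binary search (alternative decomposition, same results).

-- ===== PORT A =====
-- the inner `while queue and queue[0] <= arrival_time: queue.pop(0)` loop
def popWhile (t : Int) : List Int → List Int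
  | [] => []
  | q :: qs => if q ≤ t then popWhile t qs else q :: qs

-- the `for arrival_time in times` loop; state = (queue, current_time)
def loopA : List Int → List Int → Int → List Int × Int
  | [], queue, cur => (queue, cur)
  | a :: ts, queue, cur =>
    let q := popWhile a queue
    if q.length < 10 then
      -- queue[-1]: q is nonempty in this branch, so getLastD 0 is exactly Python's q[-1]
      let f := if q.isEmpty then a + 300 else max (q.getLastD 0) a + 300
      loopA ts (q ++ [f]) f
    else
      loopA ts q cur

-- times[0] raises IndexError on []: Pre_solution excludes the empty list, headD 0 is a placeholder
def solution (times : List Int) : Int :=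
  ((loopA times [] (times.headD 0)).1.getLast?).getD (loopA times [] (times.headD 0)).2

-- ===== PORT B =====
-- _bisect_right: first index in [lo, hi) whose value is > x (a[mid] always in range in our uses);
-- the extra fuel argument (hi - lo halvings always suffice) only makes the while-loop total
def bisectGo (a : List Int) (x : Int) : Nat → Nat → Nat → Nat
  | 0, lo, _ => lo
  | fuel + 1, lo, hi =>
    if lo < hi then
      if a.getD ((lo + hi) / 2) 0 ≤ x then bisectGo a x fuel ((lo + hi) / 2 + 1) hi
      else bisectGo a x fuel lo ((lo + hi) / 2)
    else lo

def bisectRight (a : List Int) (x : Int) (lo hi : Nat) : Nat :=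
  bisectGo a x (hi - lo) lo hi

-- the `for arrival in times` loop; state = (finishes, start)
def loopB : List Int → List Int → Nat → List Int × Nat
  | [], fin, start => (fin, start)
  | a :: ts, fin, start =>
    let start' := bisectRight fin a start fin.length
    let active := fin.length - start'
    if active < 10 then
      let f := if active = 0 then a + 300 else fin.getLastD 0 + 300
      loopB ts (fin ++ [f]) start'
    else
      loopB ts fin start'

def solution_alt (times : List Int) : Int :=
  ((loopB times [] 0).1.getLast?).getD (times.headD 0)

-- ===== PRECONDITION & SPEC =====
-- Pre_ excludes only the empty list, on which A raises IndexError at `times[0]`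
def Pre_solution (times : List Int) : Prop := times ≠ []
instance (times : List Int) : Decidable (Pre_solution times) := by unfold Pre_solution; infer_instance
def pvWitness_solution : List Int := ([5, 5, 400])

def Spec_solution (times : List Int) (out : Int) : Prop := out = solution_alt times
instance (times : List Int) (out : Int) : Decidable (Spec_solution times out) := by unfold Spec_solution; infer_instance

-- ===== CLAIM (what is proved, stated in full; the proofs are below) =====
def Claim_equal_solution : Prop := ∀ (times : List Int), Dom_solution times → Pre_solution times → Spec_solution times (solution times)

-- ===== LEMMAS AND PROOFS =====

-- monotone access in a sorted list
lemma sorted_getD_le (a : List Int) (hs : a.Pairwise (· < ·)) {i j : Nat}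
    (hij : i ≤ j) (hj : j < a.length) : a.getD i 0 ≤ a.getD j 0 := by
  rcases Nat.lt_or_ge i j with h | h
  · rw [List.getD_eq_getElem _ _ (lt_of_le_of_lt hij hj), List.getD_eq_getElem _ _ hj]
    exact le_of_lt ((List.pairwise_iff_getElem.mp hs) i j _ hj h)
  · have : i = j := le_antisymm hij h
    subst this; rfl

-- characterisation of bisectGo on a sorted list, by induction on the fuel
lemma bisectGo_spec (a : List Int) (x : Int) (hs : a.Pairwise (· < ·)) :
    ∀ n lo hi, hi - lo ≤ n → lo ≤ hi → hi ≤ a.length →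
    lo ≤ bisectGo a x n lo hi ∧ bisectGo a x n lo hi ≤ hi ∧
    (∀ i, lo ≤ i → i < bisectGo a x n lo hi → a.getD i 0 ≤ x) ∧
    (∀ i, bisectGo a x n lo hi ≤ i → i < hi → ¬ a.getD i 0 ≤ x) := by
  intro n
  induction n with
  | zero =>
    intro lo hi hn hlohi hhi
    rw [bisectGo]
    exact ⟨le_refl _, by omega, fun i h1 h2 => absurd (lt_of_le_of_lt h1 h2) (by omega),
           fun i h1 h2 => absurd h2 (by omega)⟩
  | succ m ih =>
    intro lo hi hn hlohi hhi
    rw [bisectGo]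
    by_cases h : lo < hi
    · simp only [if_pos h]
      have hmlo : lo ≤ (lo + hi) / 2 := by omega
      have hmhi : (lo + hi) / 2 < hi := by omega
      by_cases hP : a.getD ((lo + hi) / 2) 0 ≤ x
      · simp only [if_pos hP]
        obtain ⟨h1, h2, h3, h4⟩ := ih ((lo + hi) / 2 + 1) hi (by omega) (by omega) hhi
        refine ⟨by omega, h2, ?_, h4⟩
        intro i hi1 hi2
        rcases Nat.lt_or_ge i ((lo + hi) / 2 + 1) with hc | hc
        · exact le_trans (sorted_getD_le a hs (by omega) (by omega)) hP
        · exact h3 i hc hi2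
      · simp only [if_neg hP]
        obtain ⟨h1, h2, h3, h4⟩ := ih lo ((lo + hi) / 2) (by omega) (by omega) (by omega)
        refine ⟨h1, by omega, h3, ?_⟩
        intro i hi1 hi2
        rcases Nat.lt_or_ge i ((lo + hi) / 2) with hc | hc
        · exact h4 i hi1 hc
        · intro hle
          exact hP (le_trans (sorted_getD_le a hs hc (by omega)) hle)
    · simp only [if_neg h]
      exact ⟨le_refl _, by omega, fun i h1 h2 => absurd (lt_of_le_of_lt h1 h2) (by omega),
             fun i h1 h2 => absurd h2 (by omega)⟩

-- the same, stated for bisectRight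
lemma bisect_spec (a : List Int) (x : Int) (hs : a.Pairwise (· < ·)) :
    ∀ n lo hi, hi - lo = n → lo ≤ hi → hi ≤ a.length →
    lo ≤ bisectRight a x lo hi ∧ bisectRight a x lo hi ≤ hi ∧
    (∀ i, lo ≤ i → i < bisectRight a x lo hi → a.getD i 0 ≤ x) ∧
    (∀ i, bisectRight a x lo hi ≤ i → i < hi → ¬ a.getD i 0 ≤ x) := by
  intro n lo hi _ hlohi hhi
  unfold bisectRight
  exact bisectGo_spec a x hs (hi - lo) lo hi (le_refl _) hlohi hhi

-- popWhile on a suffix of a sorted list lands exactly at the bisect index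
lemma popWhile_drop (a : List Int) (x : Int) :
    ∀ n lo k, k - lo = n → lo ≤ k → k ≤ a.length →
    (∀ i, lo ≤ i → i < k → a.getD i 0 ≤ x) →
    (∀ i, k ≤ i → i < a.length → ¬ a.getD i 0 ≤ x) →
    popWhile x (a.drop lo) = a.drop k := by
  intro n
  induction n with
  | zero =>
    intro lo k hn hlk hk hle hgt
    have : lo = k := by omega
    subst this
    rcases Nat.lt_or_ge lo a.length with h | h
    · rw [List.drop_eq_getElem_cons h, popWhile]
      have := hgt lo (le_refl _) h
      rw [List.getD_eq_getElem _ _ h] at this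
      simp [this]
    · simp [List.drop_eq_nil_of_le h, popWhile]
  | succ m ih =>
    intro lo k hn hlk hk hle hgt
    have hlo : lo < a.length := by omega
    rw [List.drop_eq_getElem_cons hlo, popWhile]
    have hP := hle lo (le_refl _) (by omega)
    rw [List.getD_eq_getElem _ _ hlo] at hP
    rw [if_pos hP]
    exact ih (lo + 1) k (by omega) (by omega) hk (fun i h1 h2 => hle i (by omega) h2) hgt

-- last element of a nonempty list as a getD
lemma getLastD_eq_getD (a : List Int) (h : 0 < a.length) :
    a.getLastD 0 = a.getD (a.length - 1) 0 := by
  rw [List.getLastD_eq_getLast?, List.getLast?_eq_getElem?,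
      List.getD_eq_getElem?_getD, List.getElem?_eq_getElem (by omega)]

-- last element of a nonempty suffix
lemma getLastD_drop (a : List Int) (k : Nat) (h : k < a.length) :
    (a.drop k).getLastD 0 = a.getLastD 0 := by
  rw [getLastD_eq_getD _ (by simp; omega), getLastD_eq_getD _ (by omega)]
  rw [List.getD_eq_getElem _ _ (by simp; omega), List.getD_eq_getElem _ _ (by omega)]
  simp
  congr 1
  omega

-- every element of a sorted list is at most its last element
lemma sorted_le_getLastD (a : List Int) (hs : a.Pairwise (· < ·)) {y : Int}
    (hy : y ∈ a) : y ≤ a.getLastD 0 := by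
  obtain ⟨i, hi, rfl⟩ := List.mem_iff_getElem.mp hy
  have h0 : 0 < a.length := by omega
  rw [getLastD_eq_getD _ h0, ← List.getD_eq_getElem a 0 hi]
  exact sorted_getD_le a hs (by omega) (by omega)

-- main loop correspondence: A's (queue, cur) is (drop start fin, getLastD fin) throughout
lemma loop_main : ∀ (ts fin : List Int) (start : Nat),
    fin.Pairwise (· < ·) → start < fin.length →
    loopA ts (fin.drop start) (fin.getLastD 0) =
      ((loopB ts fin start).1.drop (loopB ts fin start).2, (loopB ts fin start).1.getLastD 0) ∧
    (loopB ts fin start).1.Pairwise (· < ·) ∧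
    (loopB ts fin start).2 < (loopB ts fin start).1.length := by
  intro ts
  induction ts with
  | nil => intro fin start hs hlt; exact ⟨rfl, hs, hlt⟩
  | cons a ts ih =>
    intro fin start hs hlt
    obtain ⟨hk1, hk2, hk3, hk4⟩ :=
      bisect_spec fin a hs (fin.length - start) start fin.length rfl (by omega) (le_refl _)
    generalize hkdef : bisectRight fin a start fin.length = k at hk1 hk2 hk3 hk4
    have hpop : popWhile a (fin.drop start) = fin.drop k :=
      popWhile_drop fin a (k - start) start k rfl hk1 hk2 hk3 hk4
    have hqlen : (fin.drop k).length = fin.length - k := by simp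
    by_cases hfull : fin.length - k < 10
    · by_cases hempty : fin.length - k = 0
      · -- queue emptied: k = fin.length, new entry a + 300
        have hke : k = fin.length := by omega
        have hdropnil : fin.drop k = [] := List.drop_eq_nil_of_le (by omega)
        have hA : loopA (a :: ts) (fin.drop start) (fin.getLastD 0) =
            loopA ts [a + 300] (a + 300) := by
          rw [loopA]
          simp [hpop, hdropnil]
        have hB : loopB (a :: ts) fin start = loopB ts (fin ++ [a + 300]) k := by
          rw [loopB, hkdef]
          simp [hempty]
        have hlast : fin.getLastD 0 ≤ a := by
          have := hk3 (fin.length - 1) (by omega) (by omega)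
          rwa [getLastD_eq_getD _ (by omega)]
        have hs' : (fin ++ [a + 300]).Pairwise (· < ·) := by
          rw [List.pairwise_append]
          refine ⟨hs, List.pairwise_singleton _ _, ?_⟩
          intro y hy z hz
          simp at hz; subst hz
          have := sorted_le_getLastD fin hs hy
          omega
        obtain ⟨e1, e2, e3⟩ := ih (fin ++ [a + 300]) k hs' (by simp; omega)
        have hde : (fin ++ [a + 300]).drop k = [a + 300] := by
          rw [List.drop_append_of_le_length (by omega), hdropnil, List.nil_append]
        have hlf : (fin ++ [a + 300]).getLastD 0 = a + 300 := by simp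
        rw [hde, hlf] at e1
        rw [hA, hB]
        exact ⟨e1, e2, e3⟩
      · -- queue still nonempty: k < fin.length, new entry last + 300
        have hklt : k < fin.length := by omega
        have hne : ¬ (fin.drop k).isEmpty = true := by
          simp [List.isEmpty_iff, List.drop_eq_nil_iff]; omega
        have hqlast : (fin.drop k).getLastD 0 = fin.getLastD 0 := getLastD_drop fin k hklt
        have hmax : max ((fin.drop k).getLastD 0) a = fin.getLastD 0 := by
          rw [hqlast]
          have := hk4 k (le_refl _) hklt
          have h3 : fin.getD k 0 ≤ fin.getLastD 0 := by
            rw [getLastD_eq_getD _ (by omega)]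
            exact sorted_getD_le fin hs (by omega) (by omega)
          omega
        have hA : loopA (a :: ts) (fin.drop start) (fin.getLastD 0) =
            loopA ts (fin.drop k ++ [fin.getLastD 0 + 300]) (fin.getLastD 0 + 300) := by
          rw [loopA]
          simp only [hpop, hqlen, if_pos hfull, if_neg hne, hmax]
        have hB : loopB (a :: ts) fin start =
            loopB ts (fin ++ [fin.getLastD 0 + 300]) k := by
          rw [loopB, hkdef]
          simp only [if_pos hfull, if_neg hempty]
        have hs' : (fin ++ [fin.getLastD 0 + 300]).Pairwise (· < ·) := by
          rw [List.pairwise_append]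
          refine ⟨hs, List.pairwise_singleton _ _, ?_⟩
          intro y hy z hz
          simp at hz; subst hz
          have := sorted_le_getLastD fin hs hy
          simp only [List.getLastD_eq_getLast?] at this
          omega
        obtain ⟨e1, e2, e3⟩ := ih (fin ++ [fin.getLastD 0 + 300]) k hs' (by simp; omega)
        have hde : (fin ++ [fin.getLastD 0 + 300]).drop k = fin.drop k ++ [fin.getLastD 0 + 300] :=
          List.drop_append_of_le_length (by omega)
        have hlf : (fin ++ [fin.getLastD 0 + 300]).getLastD 0 = fin.getLastD 0 + 300 := by simp
        rw [hde, hlf] at e1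
        rw [hA, hB]
        exact ⟨e1, e2, e3⟩
    · -- queue full: nothing appended
      have hA : loopA (a :: ts) (fin.drop start) (fin.getLastD 0) =
          loopA ts (fin.drop k) (fin.getLastD 0) := by
        rw [loopA]
        simp only [hpop, hqlen, if_neg hfull]
      have hB : loopB (a :: ts) fin start = loopB ts fin k := by
        rw [loopB, hkdef]
        simp only [if_neg hfull]
      rw [hA, hB]
      exact ih fin k hs (by omega)

-- ===== VERDICT (by name: the statement is the Claim_ definition above) =====
theorem solution_spec : Claim_equal_solution := by
  intro times _ hpre
  unfold Spec_solution solution solution_alt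
  match times with
  | [] => exact absurd rfl hpre
  | t :: ts =>
    -- first iteration on both sides, by computation
    have hA : loopA (t :: ts) [] ((t :: ts).headD 0) = loopA ts [t + 300] (t + 300) := by
      simp [loopA, popWhile]
    have hB : loopB (t :: ts) [] 0 = loopB ts [t + 300] 0 := by
      simp [loopB, bisectRight, bisectGo]
    rw [hA, hB]
    obtain ⟨heq, hs', hlt'⟩ := loop_main ts [t + 300] 0 (List.pairwise_singleton _ _) (by simp)
    have hl1 : ([t + 300] : List Int).getLastD 0 = t + 300 := rfl
    rw [List.drop_zero, hl1] at heq
    rw [heq]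
    set fin' := (loopB ts [t + 300] 0).1 with hfin'
    set s' := (loopB ts [t + 300] 0).2 with hs'def
    have hne : fin'.drop s' ≠ [] := by
      simp [List.drop_eq_nil_iff]; omega
    have hfne : fin' ≠ [] := by
      intro h; rw [h] at hlt'; simp at hlt'
    have h1 : (fin'.drop s').getLast? = some ((fin'.drop s').getLastD 0) := by
      rw [List.getLastD_eq_getLast?]
      cases h : (fin'.drop s').getLast? with
      | none => exact absurd (List.getLast?_eq_none_iff.mp h) hne
      | some v => rfl
    have h2 : fin'.getLast? = some (fin'.getLastD 0) := by
      rw [List.getLastD_eq_getLast?]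
      cases h : fin'.getLast? with
      | none => exact absurd (List.getLast?_eq_none_iff.mp h) hfne
      | some v => rfl
    simp only [h1, h2, Option.getD_some, getLastD_drop fin' s' hlt']
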